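-- pv_equiv track=rewrite | github.com/imanmossavat/OpenAlexProject | article-crawler-backend/app/services/staging/query_utils.py | normalize_doi
-- ===== SOURCE A (Python) =====
-- from typing import Any, Dict, List, Optional, Tuple
--
-- def normalize_doi(value: Optional[str]) -> Optional[str]:
--     if value is None:
--         return None
--     text = str(value).strip().lower()
--     prefixes = (
--         "https://doi.org/",
--         "http://doi.org/",
--         "https://dx.doi.org/",
--         "http://dx.doi.org/",
--         "doi:",
--     )
--     for prefix in prefixes:
--         if text.startswith(prefix):
--             text = text[len(prefix):]
--             break
--     text = text.strip()
--     return text or None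
-- ===== SOURCE B (Python) =====
-- def normalize_doi(value):
--     if value is None:
--         return None
--     text = str(value).strip().lower()
--     if text.startswith("doi:"):
--         text = text[4:]
--     else:
--         head, sep, tail = text.partition("://")
--         if sep and head in ("http", "https") and (
--             tail.startswith("doi.org/") or tail.startswith("dx.doi.org/")
--         ):
--             text = tail.partition("/")[2]
--     text = text.strip()
--     return text or None
-- ===== Notes on version B (the rewrite author's own statement) =====
-- stated objective: alternative
-- what changed: B replaces A's loop over the five prefix literals with a single structural parse: strip a doi-scheme prefix directly, otherwise partition the text on the URL scheme separator, check the scheme and host, and drop everything up to the first slash of the path.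
import Mathlib
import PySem

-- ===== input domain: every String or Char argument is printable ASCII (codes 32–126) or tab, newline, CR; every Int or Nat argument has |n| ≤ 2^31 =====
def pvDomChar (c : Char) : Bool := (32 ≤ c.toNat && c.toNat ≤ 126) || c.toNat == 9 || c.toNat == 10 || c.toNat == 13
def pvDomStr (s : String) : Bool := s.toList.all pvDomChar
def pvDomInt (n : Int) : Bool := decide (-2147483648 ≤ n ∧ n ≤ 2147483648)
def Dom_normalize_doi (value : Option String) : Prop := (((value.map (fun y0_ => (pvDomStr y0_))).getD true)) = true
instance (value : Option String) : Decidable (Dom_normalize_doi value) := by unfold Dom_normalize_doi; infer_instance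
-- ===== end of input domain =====

-- B replaces A's loop over five prefix literals with a single structural parse (strip "doi:",
-- or partition on "://" and check scheme/host); objective: alternative (same cost).

-- ===== PORT A =====
-- the 'for prefix in prefixes: if text.startswith(prefix): text = text[len(prefix):]; break' loop
def pvStripPrefixLoop : List String → String → String
  | [], text => text
  | p :: ps, text =>
    if PySem.Str.startswith text p then PySem.Str.slice text (some (PySem.Str.len p)) none
    else pvStripPrefixLoop ps text

def normalize_doi (value : Option String) : Option String :=
  match value with
  | none => none
  | some value =>
    let text := PySem.Str.lower (PySem.Str.strip value)
    let text := pvStripPrefixLoop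
      ["https://doi.org/", "http://doi.org/", "https://dx.doi.org/", "http://dx.doi.org/", "doi:"]
      text
    let text := PySem.Str.strip text
    if text = "" then none else some text

-- ===== PORT B =====
-- str.partition(sep) ported by hand via PySem.Chars.find (first occurrence; exact for the
-- non-empty separators "://" and "/" that Source B uses)
def pyPartition (s sep : List Char) : List Char × List Char × List Char :=
  let i := PySem.Chars.find s sep
  if i < 0 then (s, [], []) else (s.take i.toNat, sep, s.drop (i.toNat + sep.length))

def normalize_doi_alt (value : Option String) : Option String :=
  match value with
  | none => none
  | some value =>
    let t0 := PySem.Chars.lower (PySem.Chars.strip value.toList)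
    -- text[4:] on a nonnegative index is List.drop 4 (exact)
    let t1 :=
      if PySem.Chars.startswith t0 "doi:".toList then t0.drop 4
      else
        let p := pyPartition t0 "://".toList
        if p.2.1 ≠ [] ∧ (p.1 = "http".toList ∨ p.1 = "https".toList) ∧
            (PySem.Chars.startswith p.2.2 "doi.org/".toList = true ∨
             PySem.Chars.startswith p.2.2 "dx.doi.org/".toList = true)
        then (pyPartition p.2.2 "/".toList).2.2
        else t0
    let t2 := PySem.Chars.strip t1
    if t2 = [] then none else some (String.ofList t2)

-- ===== PRECONDITION & SPEC =====
def Spec_normalize_doi (value : Option String) (out : Option String) : Prop := out = normalize_doi_alt value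
instance (value : Option String) (out : Option String) : Decidable (Spec_normalize_doi value out) := by unfold Spec_normalize_doi; infer_instance

-- ===== CLAIM (what is proved, stated in full; the proofs are below) =====
def Claim_equal_normalize_doi : Prop := ∀ (value : Option String), Dom_normalize_doi value → Spec_normalize_doi value (normalize_doi value)

-- ===== LEMMAS AND PROOFS =====

-- A's prefix-stripping loop, moved to the List Char level
def pvCoreA (t : List Char) : List Char :=
  if PySem.Chars.startswith t "https://doi.org/".toList then t.drop "https://doi.org/".toList.length
  else if PySem.Chars.startswith t "http://doi.org/".toList then t.drop "http://doi.org/".toList.length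
  else if PySem.Chars.startswith t "https://dx.doi.org/".toList then t.drop "https://dx.doi.org/".toList.length
  else if PySem.Chars.startswith t "http://dx.doi.org/".toList then t.drop "http://dx.doi.org/".toList.length
  else if PySem.Chars.startswith t "doi:".toList then t.drop "doi:".toList.length
  else t

-- B's prefix-stripping block, at the List Char level (syntactically the body used in the port)
def pvCoreB (t0 : List Char) : List Char :=
  if PySem.Chars.startswith t0 "doi:".toList then t0.drop 4
  else
    let p := pyPartition t0 "://".toList
    if p.2.1 ≠ [] ∧ (p.1 = "http".toList ∨ p.1 = "https".toList) ∧
        (PySem.Chars.startswith p.2.2 "doi.org/".toList = true ∨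
         PySem.Chars.startswith p.2.2 "dx.doi.org/".toList = true)
    then (pyPartition p.2.2 "/".toList).2.2
    else t0

lemma pvNotPrefixAppend {P' P r : List Char} (h : ¬ P'.take P.length <+: P) : ¬ P' <+: P ++ r := by
  intro hp
  exact h (List.prefix_of_prefix_length_le ((List.take_prefix _ _).trans hp)
    (List.prefix_append _ _) (by simp))

lemma pvFindEq (s sub : List Char) (k : Nat) (h1 : sub <+: s.drop k)
    (h2 : ∀ i < k, ¬ sub <+: s.drop i) : PySem.Chars.find s sub = k := by
  have hnn : 0 ≤ PySem.Chars.find s sub := by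
    rw [PySem.Chars.find_nonneg_iff]
    obtain ⟨u, hu⟩ := h1
    exact ⟨s.take k, u, by rw [List.append_assoc, hu, List.take_append_drop]⟩
  obtain ⟨hp, hmin⟩ := PySem.Chars.find_spec hnn
  have hle : (PySem.Chars.find s sub).toNat ≤ k := by
    by_contra hgt; push Not at hgt; exact hmin k hgt h1
  have hge : k ≤ (PySem.Chars.find s sub).toNat := by
    by_contra hgt; push Not at hgt; exact h2 _ hgt hp
  omega

lemma pvPartitionEq (s sep u v : List Char) (hs : s = u ++ sep ++ v)
    (hno : ∀ i < u.length, ¬ sep <+: s.drop i) :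
    pyPartition s sep = (u, sep, v) := by
  have hf : PySem.Chars.find s sep = u.length := by
    apply pvFindEq _ _ u.length _ hno
    rw [hs, List.append_assoc, List.drop_left]
    exact List.prefix_append _ _
  simp only [pyPartition, hf]
  rw [if_neg (by omega)]
  simp only [Int.toNat_natCast]
  rw [hs, List.drop_left' (by simp), List.append_assoc, List.take_left]

lemma pvNoSubBelow (P sub r : List Char) (k : Nat) (hk : k + sub.length ≤ P.length)
    (hdec : ∀ i < k, ¬ sub <+: P.drop i) : ∀ i < k, ¬ sub <+: (P ++ r).drop i := by
  intro i hi
  rw [List.drop_append_of_le_length (by omega)]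
  apply pvNotPrefixAppend
  rw [List.take_of_length_le (by simp; omega)]
  exact hdec i hi

lemma pvLoopA_toList (s : String) :
    (pvStripPrefixLoop
      ["https://doi.org/", "http://doi.org/", "https://dx.doi.org/", "http://dx.doi.org/", "doi:"]
      s).toList = pvCoreA s.toList := by
  simp only [pvStripPrefixLoop, pvCoreA, PySem.Str.startswith_eq]
  split_ifs <;>
    simp [PySem.Str.toList_slice, PySem.Chars.slice_eq_listSlice, PySem.Str.len_eq,
      PySem.List.slice_from]

lemma pvFinish (s : String) (l : List Char) (h : s.toList = l) :
    (if s = "" then none else some s) =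
    (if l = [] then (none : Option String) else some (String.ofList l)) := by
  subst h
  by_cases hs : s = ""
  · subst hs; simp
  · rw [if_neg hs, if_neg (by simpa [String.toList_eq_nil_iff] using hs), String.ofList_toList]

lemma pvSw (P' P r : List Char) (h : P' <+: P) :
    PySem.Chars.startswith (P ++ r) P' = true :=
  (PySem.Chars.startswith_iff _ _).mpr (h.trans (List.prefix_append _ _))

lemma pvNotSw {P' P r : List Char} (h : ¬ P'.take P.length <+: P) :
    ¬ PySem.Chars.startswith (P ++ r) P' = true := fun hc =>
  pvNotPrefixAppend h ((PySem.Chars.startswith_iff _ _).mp hc)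

lemma pvNoUrl {t : List Char} {k : Nat} {sch hst P : List Char}
    (ht : t = t.take k ++ "://".toList ++ t.drop (k+3))
    (hh : t.take k = sch) (htl : hst <+: t.drop (k+3))
    (hP : P = (sch ++ "://".toList) ++ hst) : P <+: t := by
  obtain ⟨r, hr⟩ := htl
  refine ⟨r, ?_⟩
  conv_rhs => rw [ht]
  rw [hh, ← hr, hP]
  simp [List.append_assoc]

lemma pvCoreB_url1 (r : List Char) : pvCoreB ("https://doi.org/".toList ++ r) = r := by
  simp only [pvCoreB]
  rw [if_neg (pvNotSw (by decide))]
  have hp1 := pvPartitionEq ("https://doi.org/".toList ++ r) "://".toList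
      "https".toList ("doi.org/".toList ++ r)
    (by rw [show "https://doi.org/".toList
          = ("https".toList ++ "://".toList) ++ "doi.org/".toList from by decide,
        List.append_assoc])
    (pvNoSubBelow _ _ r _ (by decide) (by decide))
  rw [hp1, if_pos ⟨by simp, Or.inr rfl, Or.inl (pvSw _ _ _ List.prefix_rfl)⟩]
  show (pyPartition ("doi.org/".toList ++ r) "/".toList).2.2 = r
  have hp2 := pvPartitionEq ("doi.org/".toList ++ r) "/".toList "doi.org".toList r
    (by rw [show "doi.org/".toList = ("doi.org".toList ++ "/".toList) ++ [] from by decide]; simp)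
    (pvNoSubBelow _ _ r _ (by decide) (by decide))
  rw [hp2]

lemma pvCoreB_url2 (r : List Char) : pvCoreB ("http://doi.org/".toList ++ r) = r := by
  simp only [pvCoreB]
  rw [if_neg (pvNotSw (by decide))]
  have hp1 := pvPartitionEq ("http://doi.org/".toList ++ r) "://".toList
      "http".toList ("doi.org/".toList ++ r)
    (by rw [show "http://doi.org/".toList
          = ("http".toList ++ "://".toList) ++ "doi.org/".toList from by decide,
        List.append_assoc])
    (pvNoSubBelow _ _ r _ (by decide) (by decide))
  rw [hp1, if_pos ⟨by simp, Or.inl rfl, Or.inl (pvSw _ _ _ List.prefix_rfl)⟩]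
  show (pyPartition ("doi.org/".toList ++ r) "/".toList).2.2 = r
  have hp2 := pvPartitionEq ("doi.org/".toList ++ r) "/".toList "doi.org".toList r
    (by rw [show "doi.org/".toList = ("doi.org".toList ++ "/".toList) ++ [] from by decide]; simp)
    (pvNoSubBelow _ _ r _ (by decide) (by decide))
  rw [hp2]

lemma pvCoreB_url3 (r : List Char) : pvCoreB ("https://dx.doi.org/".toList ++ r) = r := by
  simp only [pvCoreB]
  rw [if_neg (pvNotSw (by decide))]
  have hp1 := pvPartitionEq ("https://dx.doi.org/".toList ++ r) "://".toList
      "https".toList ("dx.doi.org/".toList ++ r)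
    (by rw [show "https://dx.doi.org/".toList
          = ("https".toList ++ "://".toList) ++ "dx.doi.org/".toList from by decide,
        List.append_assoc])
    (pvNoSubBelow _ _ r _ (by decide) (by decide))
  rw [hp1, if_pos ⟨by simp, Or.inr rfl, Or.inr (pvSw _ _ _ List.prefix_rfl)⟩]
  show (pyPartition ("dx.doi.org/".toList ++ r) "/".toList).2.2 = r
  have hp2 := pvPartitionEq ("dx.doi.org/".toList ++ r) "/".toList "dx.doi.org".toList r
    (by rw [show "dx.doi.org/".toList = ("dx.doi.org".toList ++ "/".toList) ++ [] from by decide]; simp)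
    (pvNoSubBelow _ _ r _ (by decide) (by decide))
  rw [hp2]

lemma pvCoreB_url4 (r : List Char) : pvCoreB ("http://dx.doi.org/".toList ++ r) = r := by
  simp only [pvCoreB]
  rw [if_neg (pvNotSw (by decide))]
  have hp1 := pvPartitionEq ("http://dx.doi.org/".toList ++ r) "://".toList
      "http".toList ("dx.doi.org/".toList ++ r)
    (by rw [show "http://dx.doi.org/".toList
          = ("http".toList ++ "://".toList) ++ "dx.doi.org/".toList from by decide,
        List.append_assoc])
    (pvNoSubBelow _ _ r _ (by decide) (by decide))
  rw [hp1, if_pos ⟨by simp, Or.inl rfl, Or.inr (pvSw _ _ _ List.prefix_rfl)⟩]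
  show (pyPartition ("dx.doi.org/".toList ++ r) "/".toList).2.2 = r
  have hp2 := pvPartitionEq ("dx.doi.org/".toList ++ r) "/".toList "dx.doi.org".toList r
    (by rw [show "dx.doi.org/".toList = ("dx.doi.org".toList ++ "/".toList) ++ [] from by decide]; simp)
    (pvNoSubBelow _ _ r _ (by decide) (by decide))
  rw [hp2]

lemma pvCoreB_doi (r : List Char) : pvCoreB ("doi:".toList ++ r) = r := by
  simp only [pvCoreB]
  rw [if_pos (pvSw _ _ _ List.prefix_rfl), List.drop_left' (by decide)]

lemma pvCoreB_none (t : List Char)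
    (h1 : ¬ "https://doi.org/".toList <+: t) (h2 : ¬ "http://doi.org/".toList <+: t)
    (h3 : ¬ "https://dx.doi.org/".toList <+: t) (h4 : ¬ "http://dx.doi.org/".toList <+: t)
    (h5 : ¬ "doi:".toList <+: t) : pvCoreB t = t := by
  simp only [pvCoreB]
  rw [if_neg (fun hc => h5 ((PySem.Chars.startswith_iff _ _).mp hc))]
  by_cases hn : PySem.Chars.find t "://".toList < 0
  · have hp : pyPartition t "://".toList = (t, [], []) := by
      simp only [pyPartition]; rw [if_pos hn]
    rw [hp, if_neg (by rintro ⟨hc, -⟩; exact hc rfl)]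
  · have hnn : (0:Int) ≤ PySem.Chars.find t "://".toList := by omega
    obtain ⟨hpre, -⟩ := PySem.Chars.find_spec hnn
    obtain ⟨u, hu⟩ := hpre
    have hdrop : t.drop ((PySem.Chars.find t "://".toList).toNat + 3) = u := by
      have h3' : (t.drop (PySem.Chars.find t "://".toList).toNat).drop 3 = u := by
        rw [← hu]; exact List.drop_left' (by decide)
      rw [← h3', List.drop_drop]
    have ht : t = t.take (PySem.Chars.find t "://".toList).toNat ++ "://".toList
        ++ t.drop ((PySem.Chars.find t "://".toList).toNat + 3) := by
      conv_lhs => rw [← List.take_append_drop (PySem.Chars.find t "://".toList).toNat t]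
      rw [← hu, hdrop, List.append_assoc]
    have hp : pyPartition t "://".toList
        = (t.take (PySem.Chars.find t "://".toList).toNat, "://".toList,
           t.drop ((PySem.Chars.find t "://".toList).toNat + 3)) := by
      simp only [pyPartition]; rw [if_neg hn]; rfl
    rw [hp, if_neg ?_]
    rintro ⟨-, hh, htl⟩
    rcases hh with hh | hh <;> rcases htl with htl | htl
    · exact h2 (pvNoUrl ht hh ((PySem.Chars.startswith_iff _ _).mp htl) (by decide))
    · exact h4 (pvNoUrl ht hh ((PySem.Chars.startswith_iff _ _).mp htl) (by decide))
    · exact h1 (pvNoUrl ht hh ((PySem.Chars.startswith_iff _ _).mp htl) (by decide))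
    · exact h3 (pvNoUrl ht hh ((PySem.Chars.startswith_iff _ _).mp htl) (by decide))

lemma pvCore_eq (t : List Char) : pvCoreA t = pvCoreB t := by
  by_cases h1 : "https://doi.org/".toList <+: t
  · obtain ⟨r, rfl⟩ := h1
    rw [pvCoreA, if_pos (pvSw _ _ _ List.prefix_rfl), List.drop_left, pvCoreB_url1]
  by_cases h2 : "http://doi.org/".toList <+: t
  · obtain ⟨r, rfl⟩ := h2
    rw [pvCoreA, if_neg (pvNotSw (by decide)), if_pos (pvSw _ _ _ List.prefix_rfl),
      List.drop_left, pvCoreB_url2]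
  by_cases h3 : "https://dx.doi.org/".toList <+: t
  · obtain ⟨r, rfl⟩ := h3
    rw [pvCoreA, if_neg (pvNotSw (by decide)), if_neg (pvNotSw (by decide)),
      if_pos (pvSw _ _ _ List.prefix_rfl), List.drop_left, pvCoreB_url3]
  by_cases h4 : "http://dx.doi.org/".toList <+: t
  · obtain ⟨r, rfl⟩ := h4
    rw [pvCoreA, if_neg (pvNotSw (by decide)), if_neg (pvNotSw (by decide)),
      if_neg (pvNotSw (by decide)), if_pos (pvSw _ _ _ List.prefix_rfl),
      List.drop_left, pvCoreB_url4]
  by_cases h5 : "doi:".toList <+: t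
  · obtain ⟨r, rfl⟩ := h5
    rw [pvCoreA, if_neg (pvNotSw (by decide)), if_neg (pvNotSw (by decide)),
      if_neg (pvNotSw (by decide)), if_neg (pvNotSw (by decide)),
      if_pos (pvSw _ _ _ List.prefix_rfl), List.drop_left, pvCoreB_doi]
  · rw [pvCoreA,
      if_neg (fun hc => h1 ((PySem.Chars.startswith_iff _ _).mp hc)),
      if_neg (fun hc => h2 ((PySem.Chars.startswith_iff _ _).mp hc)),
      if_neg (fun hc => h3 ((PySem.Chars.startswith_iff _ _).mp hc)),
      if_neg (fun hc => h4 ((PySem.Chars.startswith_iff _ _).mp hc)),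
      if_neg (fun hc => h5 ((PySem.Chars.startswith_iff _ _).mp hc)),
      pvCoreB_none t h1 h2 h3 h4 h5]

theorem pv_main (v : String) : normalize_doi (some v) = normalize_doi_alt (some v) := by
  simp only [normalize_doi, normalize_doi_alt]
  apply pvFinish
  rw [PySem.Str.toList_strip, pvLoopA_toList, PySem.Str.toList_lower, PySem.Str.toList_strip,
    pvCore_eq]
  rfl

-- ===== VERDICT (by name: the statement is the Claim_ definition above) =====
theorem normalize_doi_spec : Claim_equal_normalize_doi := by
  intro value _
  unfold Spec_normalize_doi
  cases value with
  | none => rfl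
  | some v => exact pv_main v
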